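-- pv_equiv track=rewrite | github.com/pc5401/my_BOJ | 백준/Gold/1394. 암호/암호.py | solve
-- ===== SOURCE A (Python) =====
-- MOD = 900528
--
-- def solve(keys: str, ps: str) -> int:
--     n: int = len(keys)
--     m: int = len(ps)
--
--     keyboard = {key: idx + 1 for idx, key in enumerate(keys)}
--
--     rtn = 0
--     num = 1
--     for word in ps[::-1]:
--         rtn = (rtn + keyboard[word] * num) % MOD
--         num = (num * n) % MOD
--
--     return rtn % 900528
-- ===== SOURCE B (Python) =====
-- MOD = 900528
--
-- def solve(keys: str, ps: str) -> int:
--     n = len(keys)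
--     keyboard = {key: idx + 1 for idx, key in enumerate(keys)}
--     rtn = 0
--     for word in ps:
--         rtn = (rtn * n + keyboard[word]) % MOD
--     return rtn
-- ===== Notes on version B (the rewrite author's own statement) =====
-- stated objective: idiomatic
-- what changed: B replaces A's reversed-string scan that maintains a running power-of-n accumulator (num) with a forward Horner evaluation keeping a single accumulator rtn = (rtn*n + digit) % MOD, eliminating the string reversal and the second state variable.
import Mathlib
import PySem

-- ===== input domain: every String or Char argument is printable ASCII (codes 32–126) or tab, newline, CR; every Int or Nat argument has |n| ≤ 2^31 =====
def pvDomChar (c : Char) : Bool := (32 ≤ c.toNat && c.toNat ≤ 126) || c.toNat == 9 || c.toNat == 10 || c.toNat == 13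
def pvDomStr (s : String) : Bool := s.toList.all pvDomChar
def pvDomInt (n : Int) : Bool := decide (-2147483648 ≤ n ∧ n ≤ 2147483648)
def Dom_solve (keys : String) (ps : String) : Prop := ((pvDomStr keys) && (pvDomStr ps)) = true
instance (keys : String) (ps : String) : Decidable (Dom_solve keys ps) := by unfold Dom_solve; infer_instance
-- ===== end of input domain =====

-- B changes the decomposition: forward Horner with one accumulator instead of A's
-- reversed scan with a separate running power; same cost, no speed claim.
-- Both Pythons build the same dict {key: idx+1 for idx, key in enumerate(keys)}; the
-- shared transliteration of that comprehension is pwKeyboard (lookup getD _ 0 is exact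
-- under Pre_solve, which excludes the KeyError inputs).
def pwKeyboard (keys : List Char) : PySem.Dict Char Int :=
  (PySem.List.enumerate keys 0).foldl
    (fun d p => d.insert p.2 (p.1 + 1)) PySem.Dict.empty

-- ===== PORT A =====
def solve (keys : String) (ps : String) : Int :=
  let n : Int := PySem.Str.len keys
  let _m : Int := PySem.Str.len ps
  let keyboard := pwKeyboard keys.toList
  -- for word in ps[::-1]: rtn = (rtn + keyboard[word]*num) % MOD; num = (num*n) % MOD
  let st :=
    ((PySem.List.slice? ps.toList none none (-1)).getD []).foldl
      (fun (s : Int × Int) word =>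
        ((s.1 + keyboard.getD word 0 * s.2) % 900528, s.2 * n % 900528)) (0, 1)
  st.1 % 900528

-- ===== PORT B =====
def solve_alt (keys : String) (ps : String) : Int :=
  let n : Int := PySem.Str.len keys
  let keyboard := pwKeyboard keys.toList
  -- for word in ps: rtn = (rtn * n + keyboard[word]) % MOD
  ps.toList.foldl (fun rtn word => (rtn * n + keyboard.getD word 0) % 900528) 0

-- ===== PRECONDITION & SPEC =====
-- Pre_solve: every character of ps occurs in keys — exactly the inputs on which the
-- Python A (and B) returns instead of raising KeyError at keyboard[word].
def Pre_solve (keys : String) (ps : String) : Prop :=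
  (ps.toList.all (fun c => keys.toList.contains c)) = true
instance (keys : String) (ps : String) : Decidable (Pre_solve keys ps) := by
  unfold Pre_solve; infer_instance

def pvWitness_solve : String × String := ("a", "a")

def Spec_solve (keys : String) (ps : String) (out : Int) : Prop := out = solve_alt keys ps
instance (keys : String) (ps : String) (out : Int) : Decidable (Spec_solve keys ps out) := by unfold Spec_solve; infer_instance

-- ===== CLAIM (what is proved, stated in full; the proofs are below) =====
def Claim_equal_solve : Prop := ∀ (keys : String) (ps : String), Dom_solve keys ps → Pre_solve keys ps → Spec_solve keys ps (solve keys ps)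

-- ===== LEMMAS AND PROOFS =====

-- little-endian value of the digit string: polyRev n d (c :: t) reads c as the units digit
def polyRev (n : Int) (d : Char → Int) : List Char → Int
  | [] => 0
  | c :: t => d c + n * polyRev n d t

theorem polyRev_append (n : Int) (d : Char → Int) (a b : List Char) :
    polyRev n d (a ++ b) = polyRev n d a + n ^ a.length * polyRev n d b := by
  induction a with
  | nil => simp [polyRev]
  | cons c t ih => simp [polyRev, ih]; ring

-- A's loop, characterised: the rtn component is the little-endian value mod 900528
theorem foldlA_spec (n : Int) (d : Char → Int) (l : List Char) :
    ∀ r p : Int,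
      ((l.foldl (fun (s : Int × Int) w => ((s.1 + d w * s.2) % 900528, s.2 * n % 900528)) (r, p)).1) % 900528
        = (r + p * polyRev n d l) % 900528 := by
  induction l with
  | nil => intro r p; simp [polyRev]
  | cons c t ih =>
    intro r p
    have step := ih ((r + d c * p) % 900528) (p * n % 900528)
    calc ((((c :: t).foldl (fun (s : Int × Int) w => ((s.1 + d w * s.2) % 900528, s.2 * n % 900528)) (r, p)).1) % 900528)
        = ((r + d c * p) % 900528 + (p * n % 900528) * polyRev n d t) % 900528 := step
      _ = ((r + d c * p) + (p * n) * polyRev n d t) % 900528 :=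
          Int.ModEq.add (Int.emod_emod_of_dvd _ dvd_rfl)
            (Int.ModEq.mul_right _ (Int.emod_emod_of_dvd _ dvd_rfl))
      _ = (r + p * polyRev n d (c :: t)) % 900528 := by
          show _ = (r + p * (d c + n * polyRev n d t)) % 900528
          congr 1; ring

-- B's loop, characterised: forward Horner from r % 900528 computes the big-endian value
theorem foldlB_spec (n : Int) (d : Char → Int) (l : List Char) :
    ∀ r : Int,
      l.foldl (fun rtn w => (rtn * n + d w) % 900528) (r % 900528)
        = (r * n ^ l.length + polyRev n d l.reverse) % 900528 := by
  induction l with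
  | nil => intro r; simp [polyRev]
  | cons c t ih =>
    intro r
    have hstart : (r % 900528 * n + d c) % 900528 = (r * n + d c) % 900528 :=
      Int.ModEq.add (Int.ModEq.mul_right _ (Int.emod_emod_of_dvd _ dvd_rfl)) (Int.ModEq.refl _)
    calc (c :: t).foldl (fun rtn w => (rtn * n + d w) % 900528) (r % 900528)
        = t.foldl (fun rtn w => (rtn * n + d w) % 900528) ((r * n + d c) % 900528) := by
          simp only [List.foldl_cons, hstart]
      _ = ((r * n + d c) * n ^ t.length + polyRev n d t.reverse) % 900528 := ih (r * n + d c)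
      _ = (r * n ^ (c :: t).length + polyRev n d ((c :: t).reverse)) % 900528 := by
          simp only [List.reverse_cons, polyRev_append, List.length_reverse, List.length_cons,
            polyRev]
          congr 1; ring

-- ===== VERDICT (by name: the statement is the Claim_ definition above) =====
theorem solve_spec : Claim_equal_solve := by
  intro keys ps _ _
  unfold Spec_solve solve solve_alt
  simp only [PySem.List.slice?_none_none_neg_one, Option.getD_some]
  set n : Int := PySem.Str.len keys with hn
  set d : Char → Int := fun c => (pwKeyboard keys.toList).getD c 0 with hd
  have hA := foldlA_spec n d ps.toList.reverse 0 1
  have hB := foldlB_spec n d ps.toList 0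
  simp only [Int.zero_emod, zero_mul, zero_add] at hB
  simp only [hd] at hA hB
  rw [hA, hB]
  congr 1; ring
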